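-- pv_equiv track=rewrite | github.com/Gasparen/AdventOfCode | 2024/day7.py | calculate
-- ===== SOURCE A (Python) =====
-- def calculate(target, stringOfNumbers):
--     listOfNumbers = list(map(int, stringOfNumbers.split()))
--
--     results = [listOfNumbers[0]]
--     for i in range(1,len(listOfNumbers)):
--         addFactorNumber = listOfNumbers[i]
--         nextResults = []
--         for j in range(0,len(results)):
--             newSum = results[j] + addFactorNumber
--             newProduct =  results[j] * addFactorNumber
--             if newSum <= target:
--                 nextResults.append(newSum)
--             if newProduct <= target:
--                 nextResults.append(newProduct)
--         results = nextResults
--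
--     return results
-- ===== SOURCE B (Python) =====
-- def _dfs(target, nums, i, acc):
--     if i == len(nums):
--         return [acc]
--     out = []
--     s = acc + nums[i]
--     if s <= target:
--         out += _dfs(target, nums, i + 1, s)
--     p = acc * nums[i]
--     if p <= target:
--         out += _dfs(target, nums, i + 1, p)
--     return out
--
--
-- def calculate(target, stringOfNumbers):
--     nums = list(map(int, stringOfNumbers.split()))
--     return _dfs(target, nums, 1, nums[0])
-- ===== Notes on version B (the rewrite author's own statement) =====
-- stated objective: alternative
-- what changed: Replaced the layer-by-layer BFS list expansion (materialising every intermediate results list) with a prefix-sharing DFS recursion that emits each final value at the leaf, + branch before * branch, yielding the identical ordered list.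
import Mathlib
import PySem

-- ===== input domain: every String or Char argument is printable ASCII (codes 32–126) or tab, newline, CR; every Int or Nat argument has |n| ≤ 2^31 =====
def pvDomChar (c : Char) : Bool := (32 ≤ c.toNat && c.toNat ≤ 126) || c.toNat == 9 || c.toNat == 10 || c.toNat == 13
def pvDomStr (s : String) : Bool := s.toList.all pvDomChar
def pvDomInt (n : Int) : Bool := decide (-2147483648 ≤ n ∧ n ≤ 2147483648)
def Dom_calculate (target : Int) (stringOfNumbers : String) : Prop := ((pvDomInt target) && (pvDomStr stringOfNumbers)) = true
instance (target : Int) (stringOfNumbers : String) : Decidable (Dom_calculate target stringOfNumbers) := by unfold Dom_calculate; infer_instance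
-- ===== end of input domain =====

-- B replaces A's layer-by-layer BFS list expansion with a prefix-sharing DFS recursion
-- emitting each value at the leaf (+ branch before *); same ordered result list.

-- ===== PORT A =====
-- Literal port of A: parse, seed [nums[0]], then for each further number rebuild
-- the whole results list by appending guarded sum/product for each old entry.
def calculate (target : Int) (stringOfNumbers : String) : List Int :=
  let listOfNumbers : List Int :=
    (PySem.Str.split₀ stringOfNumbers).map (fun w => (PySem.Int.ofStr? w).getD 0)
  match listOfNumbers with
  | [] => []  -- Python raises IndexError here (listOfNumbers[0]); excluded by Pre_
  | n0 :: rest =>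
    rest.foldl (fun results addFactorNumber =>
      results.foldl (fun nextResults r =>
        let newSum := r + addFactorNumber
        let newProduct := r * addFactorNumber
        let nextResults := if newSum ≤ target then nextResults ++ [newSum] else nextResults
        if newProduct ≤ target then nextResults ++ [newProduct] else nextResults) []) [n0]

-- ===== PORT B =====
-- Port of Source B's _dfs: recursion over the remaining numbers, emit acc at the leaf.
def calcDfs (target : Int) (acc : Int) : List Int → List Int
  | [] => [acc]
  | a :: rest =>
    (if acc + a ≤ target then calcDfs target (acc + a) rest else []) ++
    (if acc * a ≤ target then calcDfs target (acc * a) rest else [])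

def calculate_alt (target : Int) (stringOfNumbers : String) : List Int :=
  let nums : List Int :=
    (PySem.Str.split₀ stringOfNumbers).map (fun w => (PySem.Int.ofStr? w).getD 0)
  match nums with
  | [] => []  -- Source B raises IndexError here too; excluded by Pre_
  | n0 :: rest => calcDfs target n0 rest

-- ===== PRECONDITION & SPEC =====
-- Pre_ excludes exactly the inputs where both Pythons raise: an empty token list
-- (IndexError at nums[0]) or a token int() rejects (ValueError).
def Pre_calculate (target : Int) (stringOfNumbers : String) : Prop :=
  PySem.Str.split₀ stringOfNumbers ≠ [] ∧
  ∀ w ∈ PySem.Str.split₀ stringOfNumbers, (PySem.Int.ofStr? w).isSome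
instance (target : Int) (stringOfNumbers : String) : Decidable (Pre_calculate target stringOfNumbers) := by
  unfold Pre_calculate; infer_instance
def pvWitness_calculate : Int × String := (10, "1 2 3")
def Spec_calculate (target : Int) (stringOfNumbers : String) (out : List Int) : Prop := out = calculate_alt target stringOfNumbers
instance (target : Int) (stringOfNumbers : String) (out : List Int) : Decidable (Spec_calculate target stringOfNumbers out) := by unfold Spec_calculate; infer_instance

-- ===== CLAIM (what is proved, stated in full; the proofs are below) =====
def Claim_equal_calculate : Prop := ∀ (target : Int) (stringOfNumbers : String), Dom_calculate target stringOfNumbers → Pre_calculate target stringOfNumbers → Spec_calculate target stringOfNumbers (calculate target stringOfNumbers)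

-- ===== LEMMAS AND PROOFS =====

-- A's inner loop over one layer = flatMap of the guarded two-element children list.
theorem calc_inner_eq_flatMap (target a : Int) (results : List Int) :
    results.foldl (fun nextResults r =>
        let newSum := r + a
        let newProduct := r * a
        let nextResults := if newSum ≤ target then nextResults ++ [newSum] else nextResults
        if newProduct ≤ target then nextResults ++ [newProduct] else nextResults) []
      = results.flatMap (fun r =>
          (if r + a ≤ target then [r + a] else []) ++ (if r * a ≤ target then [r * a] else [])) := by
  have h : ∀ (acc : List Int),
      results.foldl (fun nextResults r =>
        let newSum := r + a
        let newProduct := r * a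
        let nextResults := if newSum ≤ target then nextResults ++ [newSum] else nextResults
        if newProduct ≤ target then nextResults ++ [newProduct] else nextResults) acc
      = acc ++ results.flatMap (fun r =>
          (if r + a ≤ target then [r + a] else []) ++ (if r * a ≤ target then [r * a] else [])) := by
    intro acc
    rw [← PySem.List.foldl_append_eq_flatMap]
    apply PySem.List.foldl_congr_mem
    intro acc' r _
    simp only
    split_ifs <;> simp
  simpa using h []

-- A's outer fold from any layer L equals flatMap of the DFS over the rest.
theorem calc_fold_eq_dfs (target : Int) (rest : List Int) :
    ∀ (L : List Int),
      rest.foldl (fun results a =>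
        results.foldl (fun nextResults r =>
          let newSum := r + a
          let newProduct := r * a
          let nextResults := if newSum ≤ target then nextResults ++ [newSum] else nextResults
          if newProduct ≤ target then nextResults ++ [newProduct] else nextResults) []) L
      = L.flatMap (fun r => calcDfs target r rest) := by
  induction rest with
  | nil => intro L; simp [calcDfs]
  | cons a rest ih =>
    intro L
    rw [List.foldl_cons, ih, calc_inner_eq_flatMap, List.flatMap_assoc]
    apply List.flatMap_congr
    intro r _
    simp only [calcDfs]
    split_ifs <;> simp

-- ===== VERDICT (by name: the statement is the Claim_ definition above) =====
theorem calculate_spec : Claim_equal_calculate := by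
  intro target s _ _
  unfold Spec_calculate calculate calculate_alt
  cases h : (PySem.Str.split₀ s).map (fun w => (PySem.Int.ofStr? w).getD 0) with
  | nil => rfl
  | cons n0 rest =>
    simp only
    rw [calc_fold_eq_dfs]
    simp
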